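-- pv_equiv track=rewrite | github.com/UjjvalDE/hackerearth | Project_Employees_I.py | getEarningsByDepartment
-- ===== SOURCE A (Python) =====
-- def getEarningsByDepartment(salary_info):
--     employee_departments = {}
--
--     for info in salary_info:
--         name, department, salary = info[0], info[1], int(info[2])
--
--         if department not in employee_departments:
--             employee_departments[department] = 0
--         employee_departments[department] += salary
--
--     return sorted(employee_departments.items())
-- ===== SOURCE B (Python) =====
-- def getEarningsByDepartment(salary_info):
--     rows = sorted(salary_info, key=lambda r: r[1])
--     out = []
--     for r in rows:
--         if out and out[-1][0] == r[1]:
--             out[-1] = (r[1], out[-1][1] + int(r[2]))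
--         else:
--             out.append((r[1], int(r[2])))
--     return out
-- ===== Notes on version B (the rewrite author's own statement) =====
-- stated objective: alternative
-- what changed: Replaces A's dict-accumulate-then-sort with sort-by-department-then-merge-adjacent-runs: salaries are summed over consecutive equal-department rows of the sorted list, so no dictionary and no final sort of items is needed.
import Mathlib
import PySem

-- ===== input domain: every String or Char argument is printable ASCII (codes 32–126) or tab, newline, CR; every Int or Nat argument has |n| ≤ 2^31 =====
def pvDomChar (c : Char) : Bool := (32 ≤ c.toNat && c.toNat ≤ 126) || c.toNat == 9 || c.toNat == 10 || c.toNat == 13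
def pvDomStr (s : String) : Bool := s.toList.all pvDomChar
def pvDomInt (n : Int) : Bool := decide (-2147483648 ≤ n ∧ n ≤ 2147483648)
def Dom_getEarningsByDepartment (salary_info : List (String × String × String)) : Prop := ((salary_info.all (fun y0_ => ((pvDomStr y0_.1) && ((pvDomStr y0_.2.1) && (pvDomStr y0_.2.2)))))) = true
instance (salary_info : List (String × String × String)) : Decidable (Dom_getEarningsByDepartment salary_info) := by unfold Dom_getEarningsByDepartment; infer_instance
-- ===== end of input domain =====

-- B sorts the rows by department and merges adjacent equal-department runs, instead of
-- A's dict-accumulate-then-sort; same result by a different decomposition (objective: alternative).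

-- ===== PORT A =====
def getEarningsByDepartment (salary_info : List (String × String × String)) : List (String × Int) :=
  let employee_departments : PySem.Dict String Int :=
    salary_info.foldl (fun d info =>
      let department := info.2.1
      let salary := (PySem.Int.ofStr? info.2.2).getD 0    -- int(info[2]); Pre_ excludes the ValueError case
      let d := if d.contains department then d else d.insert department 0
      d.insert department (d.getD department 0 + salary)) PySem.Dict.empty
  PySem.List.sorted2 employee_departments.items Prod.fst Prod.snd false

-- ===== PORT B =====
def getEarningsByDepartment_alt (salary_info : List (String × String × String)) : List (String × Int) :=
  let rows := PySem.List.sorted salary_info (fun r => r.2.1) false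
  rows.foldl (fun out r =>
    match out.getLast? with
    | some last =>
        if last.1 == r.2.1 then
          out.dropLast ++ [(r.2.1, last.2 + (PySem.Int.ofStr? r.2.2).getD 0)]
        else
          out ++ [(r.2.1, (PySem.Int.ofStr? r.2.2).getD 0)]
    | none => out ++ [(r.2.1, (PySem.Int.ofStr? r.2.2).getD 0)]) []

-- ===== PRECONDITION & SPEC =====
-- Pre_ excludes exactly the inputs on which Python's int(info[2]) raises ValueError (both A and B raise there).
def Pre_getEarningsByDepartment (salary_info : List (String × String × String)) : Prop :=
  ∀ r ∈ salary_info, (PySem.Int.ofStr? r.2.2).isSome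
instance (salary_info : List (String × String × String)) : Decidable (Pre_getEarningsByDepartment salary_info) := by unfold Pre_getEarningsByDepartment; infer_instance
def pvWitness_getEarningsByDepartment : (List (String × String × String)) :=
  [("ann", "dev", " 7 "), ("bob", "qa", "+5"), ("cy", "dev", "-3")]

def Spec_getEarningsByDepartment (salary_info : List (String × String × String)) (out : List (String × Int)) : Prop := out = getEarningsByDepartment_alt salary_info
instance (salary_info : List (String × String × String)) (out : List (String × Int)) : Decidable (Spec_getEarningsByDepartment salary_info out) := by unfold Spec_getEarningsByDepartment; infer_instance

-- ===== CLAIM (what is proved, stated in full; the proofs are below) =====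
def Claim_equal_getEarningsByDepartment : Prop := ∀ (salary_info : List (String × String × String)), Dom_getEarningsByDepartment salary_info → Pre_getEarningsByDepartment salary_info → Spec_getEarningsByDepartment salary_info (getEarningsByDepartment salary_info)

-- ===== LEMMAS AND PROOFS =====

-- abbreviations for the proofs
def pvKey (r : String × String × String) : String := r.2.1
def pvVal (r : String × String × String) : Int := (PySem.Int.ofStr? r.2.2).getD 0
def pvTot (l : List (String × String × String)) (c : String) : Int :=
  ((l.filter (fun r => pvKey r == c)).map pvVal).sum
def pvStepB (out : List (String × Int)) (r : String × String × String) : List (String × Int) :=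
  match out.getLast? with
  | some last =>
      if last.1 == r.2.1 then
        out.dropLast ++ [(r.2.1, last.2 + (PySem.Int.ofStr? r.2.2).getD 0)]
      else
        out ++ [(r.2.1, (PySem.Int.ofStr? r.2.2).getD 0)]
  | none => out ++ [(r.2.1, (PySem.Int.ofStr? r.2.2).getD 0)]

lemma altB_eq (l : List (String × String × String)) :
    getEarningsByDepartment_alt l = (PySem.List.sorted l pvKey false).foldl pvStepB [] := rfl

-- A's loop body is a plain insert of the updated total
lemma stepA_eq (d : PySem.Dict String Int) (r : String × String × String) :
    (let department := r.2.1
     let salary := (PySem.Int.ofStr? r.2.2).getD 0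
     let d := if d.contains department then d else d.insert department 0
     d.insert department (d.getD department 0 + salary))
    = d.insert (pvKey r) (d.getD (pvKey r) 0 + pvVal r) := by
  simp only [pvKey, pvVal]
  by_cases h : d.contains r.2.1
  · simp [h]
  · simp [h, PySem.Dict.getD_insert_self, PySem.Dict.insert_insert_self,
      PySem.Dict.getD_of_not_contains d (0 : Int) (by simpa using h)]

lemma getD_loopA (l : List (String × String × String)) (d : PySem.Dict String Int) (c : String) :
    (l.foldl (fun d r => d.insert (pvKey r) (d.getD (pvKey r) 0 + pvVal r)) d).getD c 0
      = d.getD c 0 + pvTot l c := by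
  induction l generalizing d with
  | nil => simp [pvTot]
  | cons r t ih =>
      simp only [List.foldl_cons, ih]
      by_cases h : pvKey r = c
      · subst h; simp [pvTot, PySem.Dict.getD_insert_self]; ring
      · simp [pvTot, PySem.Dict.getD_insert_of_ne d _ _ (Ne.symm h), h]

-- the fold of A, in closed form
lemma foldA_items (l : List (String × String × String)) :
    (l.foldl (fun d r => d.insert (pvKey r) (d.getD (pvKey r) 0 + pvVal r))
        (PySem.Dict.empty : PySem.Dict String Int)).items
      = (PySem.Set.ofList (l.map pvKey)).map (fun c => (c, pvTot l c)) := by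
  have hnd : (l.foldl (fun d r => d.insert (pvKey r) (d.getD (pvKey r) 0 + pvVal r))
      (PySem.Dict.empty : PySem.Dict String Int)).keys.Nodup :=
    PySem.Dict.nodup_keys_foldl_insert_key l pvKey _ _ (by simp)
  have hkeys : (l.foldl (fun d r => d.insert (pvKey r) (d.getD (pvKey r) 0 + pvVal r))
      (PySem.Dict.empty : PySem.Dict String Int)).keys = PySem.Set.ofList (l.map pvKey) := by
    rw [PySem.Dict.keys_foldl_insert_key]
    simp [PySem.Set.update, PySem.Set.ofList_eq_foldl, PySem.Dict.keys_empty]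
  rw [PySem.Dict.items_eq_map_keys _ hnd 0, hkeys]
  exact List.map_congr_left (fun c _ => by rw [getD_loopA]; simp [PySem.Dict.getD_empty])

-- Set.ofList keeps first occurrences: it is a sublist of its input
lemma foldl_add_sublist {α : Type} [BEq α] (xs s : List α) :
    (xs.foldl PySem.Set.add s).Sublist (s ++ xs) := by
  induction xs generalizing s with
  | nil => simp
  | cons x t ih =>
      simp only [List.foldl_cons]
      refine (ih (PySem.Set.add s x)).trans ?_
      have h : (PySem.Set.add s x).Sublist (s ++ [x]) := by
        unfold PySem.Set.add; split <;> simp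
      simpa using h.append_right t

lemma ofList_sublist {α : Type} [BEq α] (xs : List α) :
    (PySem.Set.ofList xs).Sublist xs := by
  rw [PySem.Set.ofList_eq_foldl]; simpa using foldl_add_sublist xs []

lemma ofList_pairwise_lt (xs : List String) (h : xs.Pairwise (· ≤ ·)) :
    (PySem.Set.ofList xs).Pairwise (· < ·) := by
  have hle : (PySem.Set.ofList xs).Pairwise (· ≤ ·) := h.sublist (ofList_sublist xs)
  have hnd : (PySem.Set.ofList xs).Nodup := PySem.Set.nodup_ofList xs
  exact (hle.and hnd).imp (fun h' => lt_of_le_of_ne h'.1 h'.2)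

lemma ofList_append_singleton {α : Type} [BEq α] (xs : List α) (y : α) :
    PySem.Set.ofList (xs ++ [y]) = PySem.Set.add (PySem.Set.ofList xs) y := by
  simp [PySem.Set.ofList_eq_foldl, List.foldl_append]

lemma pvTot_append (l : List (String × String × String)) (r : String × String × String) (c : String) :
    pvTot (l ++ [r]) c = pvTot l c + (if pvKey r = c then pvVal r else 0) := by
  simp only [pvTot, List.filter_append, List.map_append, List.sum_append]
  by_cases h : pvKey r = c <;> simp [h]

lemma pvTot_of_not_mem (l : List (String × String × String)) (c : String)
    (h : c ∉ l.map pvKey) : pvTot l c = 0 := by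
  have he : l.filter (fun r => pvKey r == c) = [] := by
    refine List.filter_eq_nil_iff.mpr (fun r hr => ?_)
    simp only [beq_iff_eq]
    exact fun hc => h (hc ▸ List.mem_map_of_mem hr)
  simp [pvTot, he]

lemma getLast?_eq_of_max (xs : List String)
    (hp : xs.Pairwise (· < ·)) (m : String) (hm : m ∈ xs) (hall : ∀ x ∈ xs, x ≤ m) :
    xs.getLast? = some m := by
  rcases List.eq_nil_or_concat xs with rfl | ⟨ys, a, rfl⟩
  · cases hm
  · simp only [List.concat_eq_append] at hp hm hall ⊢
    rw [List.getLast?_concat]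
    rcases List.mem_append.mp hm with h | h
    · exact absurd ((List.pairwise_append.mp hp).2.2 m h a (by simp))
        (not_lt.mpr (hall a (by simp)))
    · exact congrArg some (List.mem_singleton.mp h).symm

-- B's merge loop over a key-sorted list, in closed form
lemma foldB_sorted (l : List (String × String × String))
    (hs : l.Pairwise (fun a b => pvKey a ≤ pvKey b)) :
    l.foldl pvStepB [] = (PySem.Set.ofList (l.map pvKey)).map (fun c => (c, pvTot l c)) := by
  induction l using List.reverseRecOn with
  | nil => simp [PySem.Set.ofList]
  | append_singleton l' r ih =>
      have hs' : l'.Pairwise (fun a b => pvKey a ≤ pvKey b) := hs.sublist (by simp)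
      have hle : ∀ a ∈ l', pvKey a ≤ pvKey r := fun a ha =>
        (List.pairwise_append.mp hs).2.2 a ha r (by simp)
      have hD : (PySem.Set.ofList (l'.map pvKey)).Pairwise (· < ·) :=
        ofList_pairwise_lt _ (List.pairwise_map.mpr hs')
      rw [List.foldl_append, List.foldl_cons, List.foldl_nil, ih hs']
      rw [List.map_append, List.map_cons, List.map_nil, ofList_append_singleton]
      by_cases hmem : pvKey r ∈ l'.map pvKey
      · -- the department already occurred: it is the last entry of the output, which is updated
        have hmemD : pvKey r ∈ PySem.Set.ofList (l'.map pvKey) :=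
          (PySem.Set.mem_ofList _ _).mpr hmem
        have hct : (PySem.Set.ofList (l'.map pvKey)).contains (pvKey r) = true := by
          simp only [PySem.Set.contains, List.contains_eq_mem, decide_eq_true_eq]
          exact hmemD
        have hadd : PySem.Set.add (PySem.Set.ofList (l'.map pvKey)) (pvKey r)
            = PySem.Set.ofList (l'.map pvKey) := by
          unfold PySem.Set.add; rw [if_pos hct]
        have hall : ∀ x ∈ PySem.Set.ofList (l'.map pvKey), x ≤ pvKey r := by
          intro x hx
          rcases List.mem_map.mp ((PySem.Set.mem_ofList _ _).mp hx) with ⟨a, ha, rfl⟩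
          exact hle a ha
        rcases List.getLast?_eq_some_iff.mp (getLast?_eq_of_max _ hD _ hmemD hall)
          with ⟨E, hdec⟩
        have hnd : (E ++ [pvKey r]).Nodup := hdec ▸ PySem.Set.nodup_ofList (l'.map pvKey)
        have hnotmemE : pvKey r ∉ E := fun hmm =>
          ((List.nodup_append.mp hnd).2.2 _ hmm (pvKey r) (by simp)) rfl
        have hstep : pvStepB (E.map (fun c => (c, pvTot l' c))
              ++ [(pvKey r, pvTot l' (pvKey r))]) r
            = E.map (fun c => (c, pvTot l' c))
              ++ [(pvKey r, pvTot l' (pvKey r) + pvVal r)] := by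
          unfold pvStepB
          rw [List.getLast?_concat]
          simp [pvKey, pvVal]
        rw [hadd, hdec, List.map_append, List.map_cons, List.map_nil, hstep,
          List.map_append, List.map_cons, List.map_nil]
        congr 1
        · refine List.map_congr_left (fun c hc => ?_)
          have hcr : pvKey r ≠ c := fun h => hnotmemE (h ▸ hc)
          rw [pvTot_append, if_neg hcr, add_zero]
        · rw [pvTot_append, if_pos rfl]
      · -- a new department: a fresh group is appended
        have hctf : (PySem.Set.ofList (l'.map pvKey)).contains (pvKey r) = false := by
          simp only [PySem.Set.contains, List.contains_eq_mem, decide_eq_false_iff_not]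
          exact fun h => hmem ((PySem.Set.mem_ofList _ _).mp h)
        have hadd : PySem.Set.add (PySem.Set.ofList (l'.map pvKey)) (pvKey r)
            = PySem.Set.ofList (l'.map pvKey) ++ [pvKey r] := by
          unfold PySem.Set.add; rw [if_neg (by simp only [hctf]; exact Bool.false_ne_true)]
        have happend : pvStepB ((PySem.Set.ofList (l'.map pvKey)).map (fun c => (c, pvTot l' c))) r
            = (PySem.Set.ofList (l'.map pvKey)).map (fun c => (c, pvTot l' c))
              ++ [(pvKey r, pvVal r)] := by
          unfold pvStepB
          cases hlast : ((PySem.Set.ofList (l'.map pvKey)).map (fun c => (c, pvTot l' c))).getLast? with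
          | none => rfl
          | some last =>
              rcases List.mem_map.mp (List.mem_of_getLast? hlast) with ⟨c, hc, rfl⟩
              have hcne : c ≠ pvKey r := fun h => hmem (h ▸ (PySem.Set.mem_ofList _ _).mp hc)
              simp only [pvKey] at hcne
              simp [hcne, pvKey, pvVal]
        rw [happend, hadd, List.map_append, List.map_cons, List.map_nil]
        congr 1
        · refine List.map_congr_left (fun c hc => ?_)
          have hcr : pvKey r ≠ c := fun h =>
            hmem (h ▸ (PySem.Set.mem_ofList _ _).mp hc)
          rw [pvTot_append, if_neg hcr, add_zero]
        · rw [pvTot_append, if_pos rfl, pvTot_of_not_mem l' _ hmem, zero_add]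

-- insertion with agreeing comparison functions is the same
lemma insertBy_congr {α : Type} (f g : α → α → Bool) (x : α) (acc : List α)
    (h : ∀ b ∈ acc, f x b = g x b) :
    PySem.List.insertBy f x acc = PySem.List.insertBy g x acc := by
  induction acc with
  | nil => rfl
  | cons y ys ih =>
      unfold PySem.List.insertBy
      rw [h y (by simp)]
      split
      · rfl
      · simp only [List.cons.injEq, true_and]
        exact ih (fun b hb => h b (by simp [hb]))

lemma foldl_insertBy_congr {α : Type} (S : List α) (f g : α → α → Bool)
    (h : ∀ a ∈ S, ∀ b ∈ S, f a b = g a b) :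
    ∀ (xs acc : List α), (∀ y ∈ xs, y ∈ S) → (∀ y ∈ acc, y ∈ S) →
      xs.foldl (fun acc x => PySem.List.insertBy f x acc) acc
        = xs.foldl (fun acc x => PySem.List.insertBy g x acc) acc := by
  intro xs
  induction xs with
  | nil => intro acc _ _; rfl
  | cons x t ih =>
      intro acc hxs hacc
      simp only [List.foldl_cons]
      rw [insertBy_congr f g x acc (fun b hb => h x (hxs x (by simp)) b (hacc b hb))]
      refine ih _ (fun y hy => hxs y (by simp [hy])) (fun y hy => ?_)
      rcases (PySem.List.mem_insertBy g x y acc).mp hy with rfl | hy'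
      · exact hxs y (by simp)
      · exact hacc y hy'

-- sorted2 on pairs with pairwise-distinct first components is sorting by the first component
lemma sorted2_eq_sorted_fst (xs : List (String × Int))
    (hinj : ∀ a ∈ xs, ∀ b ∈ xs, a.1 = b.1 → a = b) :
    PySem.List.sorted2 xs Prod.fst Prod.snd false = PySem.List.sorted xs Prod.fst false := by
  rw [PySem.List.sorted_eq_foldl_insertBy]
  show xs.foldl (fun acc x => PySem.List.insertBy
      (fun a b => decide (a.1 < b.1) || !decide (b.1 < a.1) && decide (a.2 < b.2)) x acc) []
    = _
  refine foldl_insertBy_congr xs _ _ (fun a ha b hb => ?_) xs [] (fun y hy => hy) (by simp)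
  by_cases h1 : a.1 < b.1
  · simp [h1]
  · by_cases h2 : b.1 < a.1
    · simp [h1, h2]
    · have : a = b := hinj a ha b hb (le_antisymm (not_lt.mp h2) (not_lt.mp h1))
      subst this
      simp

-- totals are stable under permutation of the rows
lemma pvTot_perm (l l' : List (String × String × String)) (hp : l.Perm l') (c : String) :
    pvTot l c = pvTot l' c :=
  ((hp.filter _).map pvVal).sum_eq

-- ===== VERDICT (by name: the statement is the Claim_ definition above) =====
theorem getEarningsByDepartment_spec : Claim_equal_getEarningsByDepartment := by
  intro l _ _
  show getEarningsByDepartment l = getEarningsByDepartment_alt l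
  have hstep : (fun (d : PySem.Dict String Int) (info : String × String × String) =>
      let department := info.2.1
      let salary := (PySem.Int.ofStr? info.2.2).getD 0
      let d := if d.contains department then d else d.insert department 0
      d.insert department (d.getD department 0 + salary))
      = fun d r => d.insert (pvKey r) (d.getD (pvKey r) 0 + pvVal r) :=
    funext fun d => funext fun r => stepA_eq d r
  -- closed forms of both sides
  have hrowsperm : (PySem.List.sorted l pvKey false).Perm l := PySem.List.sorted_perm l pvKey false
  have hrows : (PySem.List.sorted l pvKey false).Pairwise (fun a b => pvKey a ≤ pvKey b) :=
    List.pairwise_map.mp (PySem.List.sorted_map_key_pairwise l pvKey)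
  have hB : getEarningsByDepartment_alt l
      = (PySem.Set.ofList ((PySem.List.sorted l pvKey false).map pvKey)).map
          (fun c => (c, pvTot (PySem.List.sorted l pvKey false) c)) := by
    rw [altB_eq, foldB_sorted _ hrows]
  have hA : getEarningsByDepartment l
      = PySem.List.sorted2 ((PySem.Set.ofList (l.map pvKey)).map (fun c => (c, pvTot l c)))
          Prod.fst Prod.snd false := by
    show PySem.List.sorted2 (List.foldl _ PySem.Dict.empty l).items Prod.fst Prod.snd false = _
    rw [hstep, foldA_items]
  -- the item lists on the two sides are permutations with identical totals
  have htoteq : ∀ c, pvTot (PySem.List.sorted l pvKey false) c = pvTot l c :=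
    fun c => pvTot_perm _ _ hrowsperm c
  have hDperm : (PySem.Set.ofList ((PySem.List.sorted l pvKey false).map pvKey)).Perm
      (PySem.Set.ofList (l.map pvKey)) := by
    refine (List.perm_ext_iff_of_nodup (PySem.Set.nodup_ofList _) (PySem.Set.nodup_ofList _)).mpr
      (fun c => ?_)
    rw [PySem.Set.mem_ofList, PySem.Set.mem_ofList]
    exact ⟨fun h => (hrowsperm.map pvKey).mem_iff.mp h,
           fun h => (hrowsperm.map pvKey).mem_iff.mpr h⟩
  have hBperm : (getEarningsByDepartment_alt l).Perm
      ((PySem.Set.ofList (l.map pvKey)).map (fun c => (c, pvTot l c))) := by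
    rw [hB]
    have : (PySem.Set.ofList ((PySem.List.sorted l pvKey false).map pvKey)).map
        (fun c => (c, pvTot (PySem.List.sorted l pvKey false) c))
      = (PySem.Set.ofList ((PySem.List.sorted l pvKey false).map pvKey)).map
        (fun c => (c, pvTot l c)) :=
      List.map_congr_left (fun c _ => by rw [htoteq])
    rw [this]
    exact hDperm.map _
  have hBpair : (getEarningsByDepartment_alt l).Pairwise (fun a b => a.1 < b.1) := by
    rw [hB]
    have hD : (PySem.Set.ofList ((PySem.List.sorted l pvKey false).map pvKey)).Pairwise (· < ·) :=
      ofList_pairwise_lt _ (PySem.List.sorted_map_key_pairwise l pvKey)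
    exact List.pairwise_map.mpr hD
  -- the target of A's sort has pairwise-distinct first components
  have hinj : ∀ a ∈ (PySem.Set.ofList (l.map pvKey)).map (fun c => (c, pvTot l c)),
      ∀ b ∈ (PySem.Set.ofList (l.map pvKey)).map (fun c => (c, pvTot l c)), a.1 = b.1 → a = b := by
    intro a ha b hb hab
    rcases List.mem_map.mp ha with ⟨c, _, rfl⟩
    rcases List.mem_map.mp hb with ⟨c', _, rfl⟩
    simp only at hab
    rw [hab]
  rw [hA, sorted2_eq_sorted_fst _ hinj]
  exact PySem.List.sorted_eq_of_perm_of_pairwise_lt _ _ _ hBperm hBpair
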